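-- pv_equiv track=rewrite | github.com/vsotirasqmplus/python-regex-engine | Regex Engine/task/regex/regex.py | check_dot_text
-- ===== SOURCE A (Python) =====
-- def check_char(reg_char, char):
--     if not reg_char and not char:
--         return True
--     elif not char:
--         return False
--     elif reg_char == '.':
--         return True
--     elif reg_char == char:
--         return True
--     elif not reg_char:
--         return True
--     else:
--         return False
--
-- def check_equal_word(regex, cmp_word):
--     result = False
--     if not regex:
--         return True
--     if not cmp_word:
--         return False
--     if len(regex) > len(cmp_word):
--         return False
--     c = 0
--     if check_char(regex[0], cmp_word[0]):
--         result = True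
--         for _ in cmp_word[1:]:
--             c += 1
--             letter_check = check_char(regex[c], cmp_word[c])
--             if not letter_check:
--                 result = letter_check
--                 break
--     return result
--
-- def check_dot_text(expr, text):
--     result = False
--     len_expr = len(expr)
--     len_text = len(text)
--
--     if len_expr > len_text:
--         return result
--
--     if not expr:
--         return not result
--
--     if not text:
--         return result
--
--     if len(expr) == len(text) and not is_start_wild(expr) and not is_end_wild(expr):
--         return check_equal_word(expr, text)
--
--     depth = (len_text - len_expr + 1)
--     for offset in range(0, len_text - len_expr + 1):
--         partial_text = text[offset:offset + len_expr]
--         if len(partial_text) == len_expr: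
--             result = (result or check_equal_word(expr, partial_text))
--             if result:
--                 break
--         else:
--             break
--     return result
--
-- def is_start_wild(expr):
--     return expr[0] == '^' if len(expr) > 0 else False
--
-- def is_end_wild(expr):
--     return expr[- 1] == '$' if len(expr) > 0 else False
-- ===== SOURCE B (Python) =====
-- def check_dot_text(expr, text):
--     # Bitap (shift-and) scan: one pass over the text with integer bitmasks.
--     # Bit i of 'state' means: expr[:i+1] matches the text read so far ending here.
--     m = len(expr)
--     if m == 0:
--         return True
--     masks = {}
--     dot = 0
--     i = 0
--     for pc in expr:
--         if pc == '.':
--             dot |= 1 << i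
--         else:
--             masks[pc] = masks.get(pc, 0) | (1 << i)
--         i += 1
--     goal = 1 << (m - 1)
--     state = 0
--     for ch in text:
--         state = ((state << 1) | 1) & (masks.get(ch, 0) | dot)
--         if state & goal:
--             return True
--     return False
-- ===== Notes on version B (the rewrite author's own statement) =====
-- stated objective: alternative
-- what changed: Replaces the offset-by-offset window scan (slice each window, re-check it char by char) with a bitap (shift-and) scan: per-character bitmasks built once from the pattern, then one pass over the text updating a single prefix-match bitmask.
import Mathlib
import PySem

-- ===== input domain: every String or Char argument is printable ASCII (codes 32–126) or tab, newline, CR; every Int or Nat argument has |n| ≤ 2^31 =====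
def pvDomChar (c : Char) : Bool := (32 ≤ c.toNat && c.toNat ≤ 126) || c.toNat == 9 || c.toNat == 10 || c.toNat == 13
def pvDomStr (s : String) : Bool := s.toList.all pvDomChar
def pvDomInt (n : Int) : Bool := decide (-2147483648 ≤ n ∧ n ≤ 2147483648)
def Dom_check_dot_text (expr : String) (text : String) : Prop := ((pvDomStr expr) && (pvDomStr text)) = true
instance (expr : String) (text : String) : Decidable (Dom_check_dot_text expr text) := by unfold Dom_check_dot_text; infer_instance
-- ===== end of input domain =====

-- B replaces A's offset-window rescans by a bitap (shift-and) scan: one pass over the text with bitmasks (objective: alternative).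

-- ===== PORT A =====
-- check_char on the 1-char strings A actually indexes out; the empty-string branches
-- of the Python never fire for 1-char strings, so they are omitted here.
def check_char (regChar ch : Char) : Bool :=
  if regChar = '.' then true
  else if regChar = ch then true
  else false

-- the 'for _ in cmp_word[1:]' loop of check_equal_word, with counter c and break
def cewLoop (regex cmp : List Char) (c : Nat) : List Char → Bool
  | [] => true
  | _ :: rs =>
    match regex[c+1]?, cmp[c+1]? with
    | some r, some ch => if check_char r ch then cewLoop regex cmp (c+1) rs else false
    | _, _ => false   -- IndexError; unreachable from check_dot_text (equal lengths)

def check_equal_word (regex cmp : List Char) : Bool :=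
  if regex = [] then true
  else if cmp = [] then false
  else if regex.length > cmp.length then false
  else
    match regex[0]?, cmp[0]? with
    | some r, some ch => if check_char r ch then cewLoop regex cmp 0 cmp.tail else false
    | _, _ => false

def is_start_wild (e : List Char) : Bool :=
  if e.length > 0 then e[0]? = some '^' else false

def is_end_wild (e : List Char) : Bool :=
  if e.length > 0 then e[e.length - 1]? = some '$' else false

-- the offset loop of check_dot_text: cnt = number of remaining offsets
def dotLoop (e t : List Char) (offset : Nat) : Nat → Bool
  | 0 => false
  | cnt + 1 =>
    let partial_ := PySem.List.slice t (some (offset : Int)) (some ((offset : Int) + (e.length : Int)))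
    if partial_.length = e.length then
      if check_equal_word e partial_ then true else dotLoop e t (offset + 1) cnt
    else false

def cdtA (e t : List Char) : Bool :=
  if e.length > t.length then false
  else if e = [] then true
  else if t = [] then false
  else if e.length = t.length ∧ ¬ is_start_wild e ∧ ¬ is_end_wild e then
    check_equal_word e t
  else
    dotLoop e t 0 (t.length - e.length + 1)

def check_dot_text (expr : String) (text : String) : Bool :=
  cdtA expr.toList text.toList

-- ===== PORT B =====
-- bitap masks: the 'for pc in expr' loop with counter i building masks and dot
def maskLoop : List Char → Nat → PySem.Dict Char Nat → Nat → (PySem.Dict Char Nat × Nat)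
  | [], _, masks, dot => (masks, dot)
  | pc :: rest, i, masks, dot =>
    if pc = '.' then maskLoop rest (i + 1) masks (dot ||| (1 <<< i))
    else maskLoop rest (i + 1) (masks.insert pc ((masks.getD pc 0) ||| (1 <<< i))) dot

-- the 'for ch in text' shift-and loop ('if state & goal:' is a ≠-0 truthiness test)
def bitLoop (masks : PySem.Dict Char Nat) (dot goal : Nat) (state : Nat) : List Char → Bool
  | [] => false
  | ch :: rest =>
    let state' := ((state <<< 1) ||| 1) &&& ((masks.getD ch 0) ||| dot)
    if state' &&& goal ≠ 0 then true else bitLoop masks dot goal state' rest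

def cdtB (e t : List Char) : Bool :=
  let m := e.length
  if m = 0 then true
  else
    let md := maskLoop e 0 PySem.Dict.empty 0
    bitLoop md.1 md.2 (1 <<< (m - 1)) 0 t

def check_dot_text_alt (expr : String) (text : String) : Bool :=
  cdtB expr.toList text.toList

-- ===== PRECONDITION & SPEC =====
def Spec_check_dot_text (expr : String) (text : String) (out : Bool) : Prop := out = check_dot_text_alt expr text
instance (expr : String) (text : String) (out : Bool) : Decidable (Spec_check_dot_text expr text out) := by unfold Spec_check_dot_text; infer_instance

-- ===== CLAIM (what is proved, stated in full; the proofs are below) =====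
def Claim_equal_check_dot_text : Prop := ∀ (expr : String) (text : String), Dom_check_dot_text expr text → Spec_check_dot_text expr text (check_dot_text expr text)

-- ===== LEMMAS AND PROOFS =====

-- charwise wildcard prefix match: the common specification both sides are reduced to
def mpre : List Char → List Char → Bool
  | [], _ => true
  | _ :: _, [] => false
  | p :: ps, c :: cs => (p == '.' || p == c) && mpre ps cs

-- "some window of t matches e": fold over the suffixes of t
def fsuf (e : List Char) : List Char → Bool
  | [] => false
  | c :: cs => mpre e (c :: cs) || fsuf e cs

theorem check_char_eq (r c : Char) : check_char r c = (r == '.' || r == c) := by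
  unfold check_char
  by_cases h1 : r = '.' <;> by_cases h2 : r = c <;> simp [h1, h2]

theorem mpre_length {p u : List Char} (h : mpre p u = true) : p.length ≤ u.length := by
  induction p generalizing u with
  | nil => simp
  | cons a ps ih =>
    cases u with
    | nil => simp [mpre] at h
    | cons c cs =>
      simp only [mpre, Bool.and_eq_true] at h
      simpa using ih h.2

theorem mpre_take (p u : List Char) : mpre p (u.take p.length) = mpre p u := by
  induction p generalizing u with
  | nil => simp [mpre]
  | cons a ps ih =>
    cases u with
    | nil => simp
    | cons c cs => simp [mpre, ih]

theorem fsuf_false_of_length {e : List Char} : ∀ {u : List Char}, u.length < e.length → fsuf e u = false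
  | [], _ => rfl
  | c :: cs, h => by
    have h' : cs.length < e.length := by simp at h; omega
    rw [fsuf, fsuf_false_of_length h', Bool.or_false]
    cases hm : mpre e (c :: cs) with
    | false => rfl
    | true => exact absurd (mpre_length hm) (by simp at h ⊢; omega)

theorem cewLoop_eq (regex cmp : List Char) (hlen : regex.length = cmp.length) :
    ∀ (rest : List Char) (c : Nat), rest = cmp.drop (c + 1) →
      cewLoop regex cmp c rest = mpre (regex.drop (c + 1)) (cmp.drop (c + 1)) := by
  intro rest
  induction rest with
  | nil =>
    intro c h
    have h1 : cmp.length ≤ c + 1 := by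
      by_contra hc
      have h1 := List.drop_eq_nil_iff.mp h.symm
      omega
    rw [cewLoop, ← h, List.drop_eq_nil_of_le (by omega)]
    rfl
  | cons r rs ih =>
    intro c h
    have hc : c + 1 < cmp.length := by
      by_contra hc
      rw [List.drop_eq_nil_of_le (Nat.le_of_not_lt hc)] at h
      exact List.cons_ne_nil _ _ h
    have hcr : c + 1 < regex.length := by omega
    have hdropc : cmp.drop (c + 1) = cmp[c+1] :: cmp.drop (c + 2) := List.drop_eq_getElem_cons hc
    have hdropr : regex.drop (c + 1) = regex[c+1] :: regex.drop (c + 2) := List.drop_eq_getElem_cons hcr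
    have hr : r = cmp[c+1] ∧ rs = cmp.drop (c + 2) := by
      rw [hdropc] at h; exact ⟨(List.cons.injEq .. ▸ h).1, (List.cons.injEq .. ▸ h).2⟩
    rw [cewLoop, List.getElem?_eq_getElem hcr, List.getElem?_eq_getElem hc,
        hdropr, hdropc, mpre]
    dsimp only
    rw [check_char_eq]
    cases hcc : (regex[c+1] == '.' || regex[c+1] == cmp[c+1]) with
    | false => simp
    | true =>
      simp only [if_true, Bool.true_and]
      exact ih (c + 1) hr.2

theorem cew_eq_mpre (regex cmp : List Char) (hlen : regex.length = cmp.length) :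
    check_equal_word regex cmp = mpre regex cmp := by
  unfold check_equal_word
  cases regex with
  | nil => simp [mpre]
  | cons r ps =>
    cases cmp with
    | nil => simp at hlen
    | cons c cs =>
      simp only [reduceCtorEq, if_false]
      have : ¬ ((r :: ps).length > (c :: cs).length) := by omega
      rw [if_neg this]
      simp only [List.getElem?_cons_zero, List.tail_cons, check_char_eq, mpre]
      cases hcc : (r == '.' || r == c) with
      | false => simp
      | true =>
        simp only [if_true, Bool.true_and]
        exact cewLoop_eq (r :: ps) (c :: cs) hlen cs 0 rfl

theorem dotLoop_eq (e t : List Char) (he : e ≠ []) :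
    ∀ (cnt offset : Nat), offset + e.length + cnt = t.length + 1 →
      dotLoop e t offset cnt = fsuf e (t.drop offset) := by
  intro cnt
  induction cnt with
  | zero =>
    intro offset h
    rw [dotLoop, fsuf_false_of_length]
    rw [List.length_drop]
    have : 0 < e.length := List.length_pos_of_ne_nil he
    omega
  | succ k ih =>
    intro offset h
    rw [dotLoop]
    have hoff : offset + e.length ≤ t.length := by omega
    have hslice : PySem.List.slice t (some (offset : Int)) (some ((offset : Int) + (e.length : Int))) =
        (t.drop offset).take e.length := PySem.List.slice_natCast_add t offset e.length
    rw [hslice]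
    have hplen : ((t.drop offset).take e.length).length = e.length := by
      simp [List.length_take, List.length_drop]; omega
    rw [if_pos hplen, cew_eq_mpre e _ hplen.symm, mpre_take]
    have hlt : offset < t.length := by
      have : 0 < e.length := List.length_pos_of_ne_nil he
      omega
    have hdrop : t.drop offset = t[offset] :: t.drop (offset + 1) := List.drop_eq_getElem_cons hlt
    rw [hdrop, fsuf, ← hdrop]
    cases hm : mpre e (t.drop offset) with
    | true => simp
    | false =>
      simp only [Bool.false_or]
      exact ih (offset + 1) (by omega)

-- Bool spec of the bit k of the char-mask contributed by the suffix l of expr starting at index i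
def matchbit : List Char → Nat → Nat → Char → Bool
  | [], _, _, _ => false
  | pc :: rest, i, k, ch => (decide (k = i) && (pc == '.' || pc == ch)) || matchbit rest (i + 1) k ch

theorem testBit_one_shift (i k : Nat) : (1 <<< i).testBit k = decide (k = i) := by
  rw [Nat.shiftLeft_eq, one_mul, Nat.testBit_two_pow]
  simp [eq_comm]

theorem testBit_shift1 (s : Nat) (k : Nat) :
    ((s <<< 1) ||| 1).testBit k = if k = 0 then true else s.testBit (k - 1) := by
  have h1 : (1 : Nat) = 1 <<< 0 := rfl
  cases k with
  | zero => rw [Nat.testBit_or, Nat.testBit_shiftLeft, h1, testBit_one_shift]; simp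
  | succ n => rw [Nat.testBit_or, Nat.testBit_shiftLeft, h1, testBit_one_shift]; simp

theorem and_shift_ne_zero (x j : Nat) : (x &&& (1 <<< j) ≠ 0) ↔ x.testBit j = true := by
  constructor
  · intro h
    obtain ⟨k, hk⟩ := Nat.exists_testBit_of_ne_zero h
    rw [Nat.testBit_and, testBit_one_shift, Bool.and_eq_true, decide_eq_true_iff] at hk
    exact hk.2 ▸ hk.1
  · intro h hzero
    have : (x &&& (1 <<< j)).testBit j = true := by
      rw [Nat.testBit_and, testBit_one_shift]
      simp [h]
    rw [hzero] at this
    simp at this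

theorem maskLoop_testBit (l : List Char) : ∀ (i : Nat) (masks : PySem.Dict Char Nat) (dot : Nat)
    (ch : Char) (k : Nat),
    (((maskLoop l i masks dot).1.getD ch 0) ||| (maskLoop l i masks dot).2).testBit k
      = (((masks.getD ch 0) ||| dot).testBit k || matchbit l i k ch) := by
  induction l with
  | nil => intro i masks dot ch k; simp [maskLoop, matchbit]
  | cons pc rest ih =>
    intro i masks dot ch k
    rw [maskLoop, matchbit]
    by_cases hdot : pc = '.'
    · rw [if_pos hdot, ih]
      subst hdot
      simp only [Nat.testBit_or, testBit_one_shift, beq_self_eq_true, Bool.true_or, Bool.and_true]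
      cases decide (k = i) <;> cases (masks.getD ch 0).testBit k <;> cases dot.testBit k <;>
        cases matchbit rest (i + 1) k ch <;> simp
    · rw [if_neg hdot, ih, PySem.Dict.getD_insert]
      by_cases hch : ch = pc
      · rw [if_pos hch, hch]
        have hm : (pc == '.' || pc == pc) = true := by simp
        rw [hm]
        simp only [Nat.testBit_or, testBit_one_shift, Bool.and_true]
        cases decide (k = i) <;> cases (masks.getD pc 0).testBit k <;> cases dot.testBit k <;>
          cases matchbit rest (i + 1) k pc <;> simp
      · rw [if_neg hch]
        have hm : (pc == '.' || pc == ch) = false := by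
          simp only [Bool.or_eq_false_iff, beq_eq_false_iff_ne, ne_eq]
          exact ⟨hdot, fun hc => hch hc.symm⟩
        rw [hm]
        simp

theorem matchbit_eq (l : List Char) : ∀ (i k : Nat) (ch : Char),
    matchbit l i k ch = (decide (i ≤ k) && (match l[k - i]? with
      | some pc => (pc == '.' || pc == ch)
      | none => false)) := by
  induction l with
  | nil => intro i k ch; simp [matchbit]
  | cons pc rest ih =>
    intro i k ch
    rw [matchbit, ih]
    rcases Nat.lt_trichotomy k i with hki | hki | hki
    · have h1 : (decide (k = i)) = false := by simp; omega
      have h2 : (decide (i ≤ k)) = false := by simp; omega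
      have h3 : (decide (i + 1 ≤ k)) = false := by simp; omega
      rw [h1, h2, h3]; rfl
    · subst hki
      have h2 : (decide (k ≤ k)) = true := by simp
      have h3 : (decide (k + 1 ≤ k)) = false := by simp
      rw [h2, h3]
      simp
    · have h1 : (decide (k = i)) = false := by simp; omega
      have h2 : (decide (i ≤ k)) = true := by simp; omega
      have h3 : (decide (i + 1 ≤ k)) = true := by simp; omega
      rw [h1, h2, h3]
      have : k - i = (k - (i + 1)) + 1 := by omega
      rw [this]
      simp

-- the char mask of the full bitap table: bit k set iff expr[k] matches ch
theorem cmask_testBit (e : List Char) (ch : Char) (k : Nat) :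
    ((((maskLoop e 0 PySem.Dict.empty 0).1.getD ch 0) ||| (maskLoop e 0 PySem.Dict.empty 0).2).testBit k)
      = (match e[k]? with
          | some pc => (pc == '.' || pc == ch)
          | none => false) := by
  rw [maskLoop_testBit, matchbit_eq]
  simp

theorem mpre_drop_cons {e : List Char} {l : Nat} (hl : l < e.length) (ch : Char) (rest : List Char) :
    mpre (e.drop l) (ch :: rest) = ((e[l] == '.' || e[l] == ch) && mpre (e.drop (l + 1)) rest) := by
  rw [List.drop_eq_getElem_cons hl, mpre]

theorem bitLoop_iff (e : List Char) (he : e ≠ []) :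
    ∀ (r : List Char) (state : Nat), (∀ k, state.testBit k = true → k + 1 < e.length) →
      (bitLoop (maskLoop e 0 PySem.Dict.empty 0).1 (maskLoop e 0 PySem.Dict.empty 0).2
          (1 <<< (e.length - 1)) state r = true
        ↔ ((∃ k, state.testBit k = true ∧ mpre (e.drop (k + 1)) r = true) ∨ fsuf e r = true)) := by
  intro r
  induction r with
  | nil =>
    intro state hst
    rw [bitLoop]
    simp only [Bool.false_eq_true, false_iff]
    rintro (⟨k, hk, hm⟩ | hf)
    · have h1 := hst k hk
      have h2 := mpre_length hm
      rw [List.length_drop] at h2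
      simp at h2
      omega
    · rw [fsuf] at hf; simp at hf
  | cons ch rest ih =>
    intro state hst
    rw [bitLoop]
    have h0 : 0 < e.length := List.length_pos_of_ne_nil he
    set state' := ((state <<< 1) ||| 1) &&& (((maskLoop e 0 PySem.Dict.empty 0).1.getD ch 0) ||| (maskLoop e 0 PySem.Dict.empty 0).2) with hstate'
    have hbit : ∀ k, state'.testBit k =
        ((if k = 0 then true else state.testBit (k - 1)) &&
          (match e[k]? with
            | some pc => (pc == '.' || pc == ch)
            | none => false)) := by
      intro k
      rw [hstate', Nat.testBit_and, testBit_shift1, cmask_testBit]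
    -- bits of state' are < e.length
    have hlt : ∀ k, state'.testBit k = true → k < e.length := by
      intro k hk
      rw [hbit] at hk
      rcases Bool.and_eq_true .. |>.mp hk with ⟨_, h2⟩
      cases hek : e[k]? with
      | none =>
        rw [hek] at h2; simp at h2
      | some pc => exact (List.getElem?_eq_some_iff.mp hek).1
    -- RHS through one step
    have hrhs : ((∃ k, state.testBit k = true ∧ mpre (e.drop (k + 1)) (ch :: rest) = true) ∨ fsuf e (ch :: rest) = true)
        ↔ ((∃ k, state'.testBit k = true ∧ mpre (e.drop (k + 1)) rest = true) ∨ fsuf e rest = true) := by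
      rw [fsuf]
      constructor
      · rintro (⟨k, hk, hm⟩ | hf)
        · have hk1 := hst k hk
          have hdk : k + 1 < e.length := hk1
          rw [mpre_drop_cons hdk] at hm
          rcases Bool.and_eq_true .. |>.mp hm with ⟨hmc, hmr⟩
          refine Or.inl ⟨k + 1, ?_, hmr⟩
          rw [hbit]
          simp only [Nat.add_sub_cancel, if_neg (Nat.succ_ne_zero k)]
          rw [List.getElem?_eq_getElem hdk]
          simp [hk, hmc]
        · rcases Bool.or_eq_true .. |>.mp hf with hm | hf'
          · cases e with
            | nil => exact absurd rfl he
            | cons a as =>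
              rw [mpre] at hm
              rcases Bool.and_eq_true .. |>.mp hm with ⟨hmc, hmr⟩
              refine Or.inl ⟨0, ?_, ?_⟩
              · rw [hbit]
                simp only []
                rw [List.getElem?_cons_zero]
                exact hmc
              · simpa using hmr
          · exact Or.inr hf'
      · rintro (⟨k, hk, hm⟩ | hf)
        · rw [hbit] at hk
          rcases Bool.and_eq_true .. |>.mp hk with ⟨h1, h2⟩
          cases hek : e[k]? with
          | none => rw [hek] at h2; simp at h2
          | some pc =>
            rw [hek] at h2
            have hkm : k < e.length := List.getElem?_eq_some_iff.mp hek |>.1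
            have hpc : e[k] = pc := List.getElem?_eq_some_iff.mp hek |>.2
            by_cases hk0 : k = 0
            · subst hk0
              refine Or.inr (Bool.or_eq_true .. |>.mpr (Or.inl ?_))
              cases e with
              | nil => exact absurd rfl he
              | cons a as =>
                rw [mpre]
                have : a = pc := by simpa using hpc
                subst this
                simp only [h2, Bool.true_and]
                simpa using hm
            · rw [if_neg hk0] at h1
              refine Or.inl ⟨k - 1, h1, ?_⟩
              have hk1 : (k - 1) + 1 = k := by omega
              have h2' : (pc == '.' || pc == ch) = true := h2
              rw [hk1, mpre_drop_cons hkm, hpc, h2']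
              simpa using hm
        · exact Or.inr (Bool.or_eq_true .. |>.mpr (Or.inr hf))
    by_cases hg : state' &&& (1 <<< (e.length - 1)) ≠ 0
    · rw [if_pos hg]
      simp only [true_iff]
      rw [hrhs]
      refine Or.inl ⟨e.length - 1, (and_shift_ne_zero _ _).mp hg, ?_⟩
      have : e.length - 1 + 1 = e.length := by omega
      rw [this, List.drop_length]
      rfl
    · rw [if_neg hg]
      rw [hrhs]
      apply ih
      intro k hk
      have h1 := hlt k hk
      have h2 : k ≠ e.length - 1 := by
        intro hc
        exact hg ((and_shift_ne_zero _ _).mpr (hc ▸ hk))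
      omega

theorem cdtB_eq_fsuf (e t : List Char) (he : e ≠ []) : cdtB e t = fsuf e t := by
  unfold cdtB
  have h0 : 0 < e.length := List.length_pos_of_ne_nil he
  rw [if_neg (by omega : ¬ e.length = 0)]
  have hiff := bitLoop_iff e he t 0 (by intro k hk; simp at hk)
  cases hf : fsuf e t with
  | true =>
    exact hiff.mpr (Or.inr hf)
  | false =>
    cases hb : bitLoop (maskLoop e 0 PySem.Dict.empty 0).1 (maskLoop e 0 PySem.Dict.empty 0).2
        (1 <<< (e.length - 1)) 0 t with
    | false => rfl
    | true =>
      rcases hiff.mp hb with ⟨k, hk, _⟩ | hf'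
      · simp at hk
      · rw [hf] at hf'; simp at hf'

-- main equivalence on the list level
theorem lists_eq (e t : List Char) : cdtA e t = cdtB e t := by
  by_cases hnil : e = []
  · subst hnil
    simp [cdtA, cdtB]
  · rw [cdtB_eq_fsuf e t hnil]
    unfold cdtA
    by_cases hlen : e.length > t.length
    · rw [if_pos hlen, fsuf_false_of_length (by omega)]
    · rw [if_neg hlen, if_neg hnil]
      have hlen' : e.length ≤ t.length := Nat.le_of_not_lt hlen
      by_cases htnil : t = []
      · subst htnil
        simp only [List.length_nil, Nat.le_zero, List.length_eq_zero_iff] at hlen'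
        exact absurd hlen' hnil
      · rw [if_neg htnil]
        have hdot : dotLoop e t 0 (t.length - e.length + 1) = fsuf e t := by
          have := dotLoop_eq e t hnil (t.length - e.length + 1) 0 (by omega)
          simpa using this
        by_cases hspec : e.length = t.length ∧ ¬ is_start_wild e ∧ ¬ is_end_wild e
        · rw [if_pos hspec]
          rw [cew_eq_mpre e t hspec.1]
          cases t with
          | nil => exact absurd rfl htnil
          | cons c cs =>
            rw [fsuf, fsuf_false_of_length (by have := hspec.1; simp at this ⊢; omega),
                Bool.or_false]
        · rw [if_neg hspec, hdot]

-- ===== VERDICT (by name: the statement is the Claim_ definition above) =====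
theorem check_dot_text_spec : Claim_equal_check_dot_text := by
  intro expr text _
  unfold Spec_check_dot_text check_dot_text check_dot_text_alt
  exact lists_eq expr.toList text.toList
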